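-- pv_equiv track=rewrite | github.com/fantelo13/INF1640-REDES-DE-COMUNICACAO-DE-DADOS | crc_divisao.py | verifica_resto_zero
-- ===== SOURCE A (Python) =====
-- from typing import List, Tuple
--
-- GEN = "1011011"
--
-- def _xor_inplace(buf: List[str], pat: str, i: int) -> None:
--     for j, b in enumerate(pat):
--         buf[i+j] = '0' if buf[i+j] == b else '1'
--
-- def verifica_resto_zero(bits: str, gen: str = GEN) -> bool:
--     a = list(bits)
--     m = len(gen)
--     for i in range(0, len(a) - m + 1):
--         if a[i] == '1':
--             _xor_inplace(a, gen, i)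
--     resto = a[-(m-1):] if m > 1 else []
--     return all(c == '0' for c in resto)
-- ===== SOURCE B (Python) =====
-- GEN = "1011011"
--
-- def verifica_resto_zero(bits: str, gen: str = GEN) -> bool:
--     m = len(gen)
--     reg = []
--     for c in bits:
--         reg.append(c)
--         if len(reg) == m:
--             if reg[0] == '1':
--                 reg = ['0' if reg[j] == gen[j] else '1' for j in range(m)]
--             reg.pop(0)
--     return all(c == '0' for c in reg)
-- ===== Notes on version B (the rewrite author's own statement) =====
-- stated objective: idiomatic
-- what changed: B replaces A's whole-buffer in-place long division (materialise the full message, xor windows into it, slice the tail) by a streaming shift register that keeps only the current m-character window, feeding characters left to right and reducing whenever the register fills.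
import Mathlib
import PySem

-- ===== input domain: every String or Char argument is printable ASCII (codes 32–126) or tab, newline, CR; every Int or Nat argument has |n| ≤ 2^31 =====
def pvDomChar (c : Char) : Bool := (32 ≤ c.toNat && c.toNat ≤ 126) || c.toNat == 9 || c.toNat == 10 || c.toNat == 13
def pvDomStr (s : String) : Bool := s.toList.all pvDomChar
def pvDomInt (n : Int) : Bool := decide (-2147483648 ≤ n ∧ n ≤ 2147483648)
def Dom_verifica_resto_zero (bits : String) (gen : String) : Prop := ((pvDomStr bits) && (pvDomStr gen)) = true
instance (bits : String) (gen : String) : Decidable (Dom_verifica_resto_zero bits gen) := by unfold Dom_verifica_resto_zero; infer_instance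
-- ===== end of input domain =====

-- B re-implements A's whole-buffer CRC long division as a streaming shift register
-- (idiomatic streaming form, same cost); equivalence is proved for every non-empty
-- generator string (A raises IndexError when gen = "").


-- ===== PORT A =====
-- port of _xor_inplace: for j, b in enumerate(pat): buf[i+j] = '0' if buf[i+j] == b else '1'
-- (the index i+j is always in range on inputs admitted by Pre_, so List.set/getD with a
--  dummy default is exact there)
def xorInplace (buf : List Char) (pat : List Char) (i : Int) : List Char :=
  (PySem.List.enumerate pat).foldl
    (fun b jb =>
      b.set (i + jb.1).toNat (if b.getD (i + jb.1).toNat ' ' = jb.2 then '0' else '1'))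
    buf

def verifica_resto_zero (bits : String) (gen : String) : Bool :=
  let a0 := bits.toList
  let m := gen.toList.length
  let a :=
    (PySem.List.pyRange 0 ((a0.length : Int) - (m : Int) + 1) 1).foldl
      (fun a i => if a.getD i.toNat ' ' = '1' then xorInplace a gen.toList i else a) a0
  let resto := if m > 1 then PySem.List.slice a (some (-((m : Int) - 1))) none else []
  resto.all (fun c => c == '0')

-- ===== PORT B =====
def verifica_resto_zero_alt (bits : String) (gen : String) : Bool :=
  let g := gen.toList
  let m := g.length
  let reg :=
    bits.toList.foldl
      (fun reg c =>
        let reg := reg ++ [c]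
        if reg.length = m then
          (if reg.headD ' ' = '1'
            then (List.range m).map (fun j => if reg.getD j ' ' = g.getD j ' ' then '0' else '1')
            else reg).tail
        else reg)
      []
  reg.all (fun c => c == '0')

-- ===== PRECONDITION & SPEC =====
-- Pre_ excludes exactly gen = "", on which A raises IndexError (its range loop reads a[len(a)]).
def Pre_verifica_resto_zero (bits : String) (gen : String) : Prop := gen.toList ≠ []
instance (bits : String) (gen : String) : Decidable (Pre_verifica_resto_zero bits gen) := by
  unfold Pre_verifica_resto_zero; infer_instance

def pvWitness_verifica_resto_zero : String × String := ("1011011", "1011011")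

def Spec_verifica_resto_zero (bits : String) (gen : String) (out : Bool) : Prop := out = verifica_resto_zero_alt bits gen
instance (bits : String) (gen : String) (out : Bool) : Decidable (Spec_verifica_resto_zero bits gen out) := by unfold Spec_verifica_resto_zero; infer_instance

-- ===== CLAIM (what is proved, stated in full; the proofs are below) =====
def Claim_equal_verifica_resto_zero : Prop := ∀ (bits : String) (gen : String), Dom_verifica_resto_zero bits gen → Pre_verifica_resto_zero bits gen → Spec_verifica_resto_zero bits gen (verifica_resto_zero bits gen)

-- ===== LEMMAS AND PROOFS =====

-- xor of the leading |g| characters of l against g, Python's loose char rule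
def xw (g l : List Char) : List Char :=
  (List.zipWith (fun a b => if a = b then '0' else '1') l g) ++ l.drop g.length

-- fuel-indexed long-division recursion; with fuel = l.length it is A's whole loop
def procA (g : List Char) : Nat → List Char → List Char
  | 0, l => l
  | n+1, l =>
    if l.length < g.length then l
    else
      match (if l.headD ' ' = '1' then xw g l else l) with
      | [] => []
      | d :: r => d :: procA g n r

def lastN (k : Nat) (l : List Char) : List Char := l.drop (l.length - k)

theorem length_xw (g l : List Char) : (xw g l).length = l.length := by
  simp [xw]; omega

theorem length_procA (g : List Char) : ∀ (n : Nat) (l : List Char), (procA g n l).length = l.length := by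
  intro n
  induction n with
  | zero => intro l; rfl
  | succ n ih =>
    intro l
    rw [procA]
    split
    · rfl
    · rename_i hlen
      have hx : (if l.headD ' ' = '1' then xw g l else l).length = l.length := by
        split <;> simp [length_xw]
      rcases hm : (if l.headD ' ' = '1' then xw g l else l) with _ | ⟨d, r⟩
      · rw [hm] at hx; simp at hx ⊢; omega
      · rw [hm] at hx; simp [ih r] at hx ⊢; omega

theorem getD_append_self (pre : List Char) (c : Char) (rest : List Char) (d : Char) :
    (pre ++ c :: rest).getD pre.length d = c := by
  simp [List.getD_eq_getElem?_getD]

theorem procA_short (g : List Char) (n : Nat) (l : List Char) (h : l.length < g.length) :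
    procA g n l = l := by
  cases n with
  | zero => rfl
  | succ n => rw [procA, if_pos h]

theorem lastN_of_le (k : Nat) (l : List Char) (h : l.length ≤ k) : lastN k l = l := by
  simp [lastN, Nat.sub_eq_zero_of_le h]

theorem lastN_cons_of_le (k : Nat) (d : Char) (x : List Char) (h : k ≤ x.length) :
    lastN k (d :: x) = lastN k x := by
  simp only [lastN, List.length_cons]
  rw [show x.length + 1 - k = (x.length - k) + 1 by omega]
  rfl

theorem mapRange_eq_xw (g r : List Char) (h : r.length = g.length) :
    (List.range g.length).map (fun j => if r.getD j ' ' = g.getD j ' ' then '0' else '1')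
    = xw g r := by
  apply List.ext_getElem
  · simp [xw, h]
  · intro i h1 h2
    simp only [List.getElem_map, List.getElem_range]
    have hig : i < g.length := by simpa using h1
    have hir : i < r.length := by omega
    simp only [xw]
    rw [List.getElem_append_left (by simpa [h] using hig)]
    rw [List.getElem_zipWith]
    rw [List.getD_eq_getElem _ _ hir, List.getD_eq_getElem _ _ hig]

theorem headD_append (r l : List Char) (h : r ≠ []) : (r ++ l).headD ' ' = r.headD ' ' := by
  rcases r with _ | ⟨a, t⟩
  · exact absurd rfl h
  · rfl

theorem xw_append (g r l : List Char) (h : r.length = g.length) :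
    xw g (r ++ l) = xw g r ++ l := by
  simp only [xw]
  have hz : List.zipWith (fun a b => if a = b then '0' else '1') (r ++ l) g
      = List.zipWith (fun a b => if a = b then '0' else '1') r g := by
    conv_lhs => rw [show g = g ++ ([] : List Char) by simp]
    rw [List.zipWith_append (h := h)]
    simp
  rw [hz, ← h, List.drop_left, List.drop_length]
  simp

-- _xor_inplace at offset pre.length rewrites exactly the window at the front of cur
theorem xor_aux (i : Int) :
    ∀ (pat : List Char) (s : Nat) (pre cur : List Char),
      i + (s : Int) = (pre.length : Int) → pat.length ≤ cur.length →
    (PySem.List.enumerate pat (s : Int)).foldl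
      (fun b jb =>
        b.set (i + jb.1).toNat (if b.getD (i + jb.1).toNat ' ' = jb.2 then '0' else '1'))
      (pre ++ cur)
    = pre ++ xw pat cur := by
  intro pat
  induction pat with
  | nil => intro s pre cur _ _; simp [PySem.List.enumerate, xw]
  | cons b pt ih =>
    intro s pre cur hs hlen
    rcases cur with _ | ⟨c, rest⟩
    · simp at hlen
    · rw [PySem.List.enumerate_cons]
      have hidx : (i + (s : Int)).toNat = pre.length := by omega
      simp only [List.foldl_cons, hidx, getD_append_self]
      have hset : (pre ++ c :: rest).set pre.length (if c = b then '0' else '1')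
          = (pre ++ [if c = b then '0' else '1']) ++ rest := by
        rw [List.set_append_right _ _ (le_refl _)]
        simp
      rw [hset]
      have := ih (s + 1) (pre ++ [if c = b then '0' else '1']) rest (by simp; omega) (by simpa using hlen)
      push_cast at this
      rw [this]
      simp [xw, List.append_assoc]

theorem xorInplace_spec (g pre cur : List Char) (h : g.length ≤ cur.length) :
    xorInplace (pre ++ cur) g (pre.length : Int) = pre ++ xw g cur := by
  have := xor_aux (pre.length : Int) g 0 pre cur (by simp) h
  simpa [xorInplace] using this

-- A's range loop from index pre.length equals the fuel recursion on the suffix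
theorem loop_eq (g : List Char) (hg : g ≠ []) :
    ∀ (n : Nat) (cur pre : List Char), cur.length = n →
    (List.range' pre.length (cur.length + 1 - g.length)).foldl
      (fun (a : List Char) (k : Nat) => if a.getD k ' ' = '1' then xorInplace a g (k : Int) else a) (pre ++ cur)
    = pre ++ procA g cur.length cur := by
  intro n
  have hg1 : 1 ≤ g.length := by
    rcases g with _ | _
    · exact absurd rfl hg
    · simp
  induction n with
  | zero =>
    intro cur pre hlen
    rcases cur with _ | ⟨c, rest⟩
    · have h0 : ([] : List Char).length + 1 - g.length = 0 := by simp; omega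
      rw [h0]
      simp [procA]
    · simp at hlen
  | succ n ih =>
    intro cur pre hlen
    rcases cur with _ | ⟨c, rest⟩
    · simp at hlen
    · obtain rfl : rest.length = n := by simpa using hlen
      rw [List.length_cons]
      by_cases hge : g.length ≤ rest.length + 1
      · -- window fits: one division step then recurse
        have hcnt : rest.length + 1 + 1 - g.length = (rest.length + 1 - g.length) + 1 := by omega
        rw [hcnt, List.range'_succ, List.foldl_cons, getD_append_self]
        by_cases hc : c = '1'
        · rw [if_pos hc,
              xorInplace_spec g pre (c :: rest) (by simp only [List.length_cons]; omega)]
          have hxlen : (xw g (c :: rest)).length = rest.length + 1 := by rw [length_xw]; simp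
          rcases hx : xw g (c :: rest) with _ | ⟨d, r⟩
          · rw [hx] at hxlen; simp at hxlen
          · rw [hx] at hxlen; simp at hxlen
            rw [show pre ++ d :: r = (pre ++ [d]) ++ r by simp,
                show pre.length + 1 = (pre ++ [d]).length by simp,
                show rest.length + 1 - g.length = r.length + 1 - g.length by omega,
                ih r (pre ++ [d]) hxlen]
            rw [procA, if_neg (by simp only [List.length_cons]; omega)]
            simp only [List.headD_cons, if_pos hc, hx]
            simp [hxlen]
        · rw [if_neg hc,
              show pre ++ c :: rest = (pre ++ [c]) ++ rest by simp,
              show pre.length + 1 = (pre ++ [c]).length by simp,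
              ih rest (pre ++ [c]) rfl]
          rw [procA, if_neg (by simp only [List.length_cons]; omega)]
          simp only [List.headD_cons, if_neg hc]
          simp
      · -- too short: loop body empty, recursion stops
        have hcnt : rest.length + 1 + 1 - g.length = 0 := by omega
        rw [hcnt]
        rw [procA, if_pos (by simp only [List.length_cons]; omega)]
        simp

theorem A_char (bits gen : String) (hg : gen.toList ≠ []) :
    verifica_resto_zero bits gen
    = (lastN (gen.toList.length - 1) (procA gen.toList bits.toList.length bits.toList)).all
        (fun c => c == '0') := by
  simp only [verifica_resto_zero]
  rw [PySem.List.pyRange_one, List.foldl_map]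
  simp only [zero_add, Int.toNat_natCast]
  rw [show (((bits.toList.length : Int) - (gen.toList.length : Int) + 1) - 0).toNat
        = bits.toList.length + 1 - gen.toList.length by omega]
  rw [List.range_eq_range']
  have hl := loop_eq gen.toList hg bits.toList.length bits.toList [] rfl
  simp only [List.nil_append, List.length_nil] at hl
  rw [hl]
  by_cases hm : 1 < gen.toList.length
  · rw [if_pos hm]
    rw [show (-((gen.toList.length : Int) - 1)) = -(((gen.toList.length - 1 : Nat)) : Int) by
          push_cast [Nat.cast_sub (by omega : 1 ≤ gen.toList.length)]; ring]
    rw [PySem.List.slice_from_neg_natCast (k := gen.toList.length - 1)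
          (xs := procA gen.toList bits.toList.length bits.toList) (by omega)]
    rw [lastN, length_procA]
  · rw [if_neg hm]
    have h1 : gen.toList.length = 1 := by
      rcases g : gen.toList with _ | ⟨_, _⟩
      · exact absurd g hg
      · rw [g] at hm; simp at hm; simp [hm]
    rw [h1]
    simp [lastN, List.drop_length]

-- B's shift-register run equals the last m-1 characters of the divided buffer
theorem B_run (g : List Char) (hg : g ≠ []) :
    ∀ (l reg : List Char), reg.length < g.length →
    List.foldl
      (fun reg c =>
        if (reg ++ [c]).length = g.length then
          (if (reg ++ [c]).headD ' ' = '1' then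
              List.map (fun j => if (reg ++ [c]).getD j ' ' = g.getD j ' ' then '0' else '1')
                (List.range g.length)
            else reg ++ [c]).tail
        else reg ++ [c])
      reg l
    = lastN (g.length - 1) (procA g (reg ++ l).length (reg ++ l)) := by
  intro l
  induction l with
  | nil =>
    intro reg hreg
    simp only [List.foldl_nil, List.append_nil]
    rw [procA_short g _ _ hreg, lastN_of_le _ _ (by omega)]
  | cons c l' ih =>
    intro reg hreg
    rw [List.foldl_cons]
    by_cases hfull : (reg ++ [c]).length = g.length
    · rw [if_pos hfull]
      -- the register is full: one reduction step
      have hmx : (if (reg ++ [c]).headD ' ' = '1' then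
            List.map (fun j => if (reg ++ [c]).getD j ' ' = g.getD j ' ' then '0' else '1')
              (List.range g.length)
          else reg ++ [c])
          = (if (reg ++ [c]).headD ' ' = '1' then xw g (reg ++ [c]) else reg ++ [c]) := by
        by_cases hh : (reg ++ [c]).headD ' ' = '1'
        · rw [if_pos hh, if_pos hh, mapRange_eq_xw g _ hfull]
        · rw [if_neg hh, if_neg hh]
      rw [hmx]
      have hlen1 : (if (reg ++ [c]).headD ' ' = '1' then xw g (reg ++ [c]) else reg ++ [c]).length
          = g.length := by
        split
        · rw [length_xw]; exact hfull
        · exact hfull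
      rcases hx : (if (reg ++ [c]).headD ' ' = '1' then xw g (reg ++ [c]) else reg ++ [c])
          with _ | ⟨d, r0⟩
      · rw [hx] at hlen1; simp at hlen1
        rcases g with _ | _
        · exact absurd rfl hg
        · simp at hlen1
      · rw [hx] at hlen1; simp at hlen1
        have hr0 : r0.length < g.length := by omega
        rw [List.tail_cons, ih r0 hr0]
        -- now identify procA on both sides
        rw [show reg ++ c :: l' = (reg ++ [c]) ++ l' by simp]
        have hf' : reg.length + 1 = g.length := by simpa using hfull
        have hL : ((reg ++ [c]) ++ l').length = (r0 ++ l').length + 1 := by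
          simp only [List.length_append, List.length_cons, List.length_nil]
          omega
        rw [hL, procA,
            if_neg (by simp only [List.length_append, List.length_cons, List.length_nil]; omega)]
        have hne : reg ++ [c] ≠ [] := by simp
        have hstep : (if ((reg ++ [c]) ++ l').headD ' ' = '1' then xw g ((reg ++ [c]) ++ l')
              else (reg ++ [c]) ++ l') = d :: (r0 ++ l') := by
          rw [headD_append _ _ hne]
          by_cases hh : (reg ++ [c]).headD ' ' = '1'
          · rw [if_pos hh, xw_append g _ _ hfull]
            rw [if_pos hh] at hx
            rw [hx]
            simp
          · rw [if_neg hh]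
            rw [if_neg hh] at hx
            rw [hx]
            simp
        rw [hstep]
        rw [lastN_cons_of_le _ _ _ (by rw [length_procA]; simp; omega)]
    · rw [if_neg hfull]
      have h2 : (reg ++ [c]).length < g.length := by
        have : (reg ++ [c]).length ≤ g.length := by simp; omega
        omega
      rw [ih (reg ++ [c]) h2]
      simp

theorem B_char (bits gen : String) (hg : gen.toList ≠ []) :
    verifica_resto_zero_alt bits gen
    = (lastN (gen.toList.length - 1) (procA gen.toList bits.toList.length bits.toList)).all
        (fun c => c == '0') := by
  simp only [verifica_resto_zero_alt]
  have h0 : ([] : List Char).length < gen.toList.length := by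
    rcases g : gen.toList with _ | _
    · exact absurd g hg
    · simp
  rw [B_run gen.toList hg bits.toList [] h0]
  simp

-- ===== VERDICT (by name: the statement is the Claim_ definition above) =====
theorem verifica_resto_zero_spec : Claim_equal_verifica_resto_zero := by
  intro bits gen _ hp
  unfold Spec_verifica_resto_zero
  rw [A_char bits gen hp, B_char bits gen hp]
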